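-- pv_equiv track=rewrite | github.com/CRJFisher/career-agent | nodes.py | _summarize_strength
-- ===== SOURCE A (Python) =====
-- from typing import Dict, Any, Optional, List, Tuple
--
-- def _summarize_strength(evidence: List[Dict[str, Any]]) -> str:
--     """Summarize overall strength of evidence."""
--     if not evidence:
--         return "NONE"
--
--     strengths = [e.get("strength", "MEDIUM") for e in evidence]
--
--     if "HIGH" in strengths:
--         return "HIGH"
--     elif "MEDIUM" in strengths:
--         return "MEDIUM"
--     else:
--         return "LOW"
-- ===== SOURCE B (Python) =====
-- def _summarize_strength(evidence):
--     """Summarize overall strength of evidence."""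
--     if not evidence:
--         return "NONE"
--     rank = {"HIGH": 3, "MEDIUM": 2}
--     best = 1
--     for e in evidence:
--         best = max(best, rank.get(e.get("strength", "MEDIUM"), 1))
--     if best == 3:
--         return "HIGH"
--     if best == 2:
--         return "MEDIUM"
--     return "LOW"
-- ===== Notes on version B (the rewrite author's own statement) =====
-- stated objective: alternative
-- what changed: Replaces the list comprehension plus two ordered membership scans with a single pass folding a numeric rank (HIGH=3, MEDIUM=2, other=1) with max, then mapping the best rank back to a label.
import Mathlib
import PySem

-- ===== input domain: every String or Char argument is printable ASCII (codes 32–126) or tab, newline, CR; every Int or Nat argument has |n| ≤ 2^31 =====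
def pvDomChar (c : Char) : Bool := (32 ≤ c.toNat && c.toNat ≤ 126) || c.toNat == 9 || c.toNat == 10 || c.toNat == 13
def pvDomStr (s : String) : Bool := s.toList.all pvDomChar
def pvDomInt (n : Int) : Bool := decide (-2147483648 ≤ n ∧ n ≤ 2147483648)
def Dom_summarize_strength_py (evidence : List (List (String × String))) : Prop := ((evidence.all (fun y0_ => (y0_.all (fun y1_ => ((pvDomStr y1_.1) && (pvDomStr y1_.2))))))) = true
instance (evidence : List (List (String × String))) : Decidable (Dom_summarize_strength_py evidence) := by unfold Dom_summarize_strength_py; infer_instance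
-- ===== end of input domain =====

-- B replaces A's comprehension-plus-two-membership-scans by a single fold of a numeric rank with max (alternative decomposition, same cost).

-- shared primitive: e.get("strength", "MEDIUM") on an association list (first match, Python dict lookup)
def getStrength (e : List (String × String)) : String :=
  ((e.find? (fun p => p.1 == "strength")).map Prod.snd).getD "MEDIUM"

-- ===== PORT A =====
def summarize_strength_py (evidence : List (List (String × String))) : String :=
  if evidence = [] then "NONE"
  else
    let strengths := evidence.map getStrength
    if "HIGH" ∈ strengths then "HIGH"
    else if "MEDIUM" ∈ strengths then "MEDIUM"
    else "LOW"

-- ===== PORT B =====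
-- rank.get(s, 1) with rank = {"HIGH": 3, "MEDIUM": 2}
def rankOf (s : String) : Int :=
  if s = "HIGH" then 3 else if s = "MEDIUM" then 2 else 1

def summarize_strength_py_alt (evidence : List (List (String × String))) : String :=
  if evidence = [] then "NONE"
  else
    let best := evidence.foldl (fun b e => max b (rankOf (getStrength e))) 1
    if best = 3 then "HIGH"
    else if best = 2 then "MEDIUM"
    else "LOW"

-- ===== PRECONDITION & SPEC =====
def Spec_summarize_strength_py (evidence : List (List (String × String))) (out : String) : Prop := out = summarize_strength_py_alt evidence
instance (evidence : List (List (String × String))) (out : String) : Decidable (Spec_summarize_strength_py evidence out) := by unfold Spec_summarize_strength_py; infer_instance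

-- ===== CLAIM (what is proved, stated in full; the proofs are below) =====
def Claim_equal_summarize_strength_py : Prop := ∀ (evidence : List (List (String × String))), Dom_summarize_strength_py evidence → Spec_summarize_strength_py evidence (summarize_strength_py evidence)

-- ===== LEMMAS AND PROOFS =====

def bestRank (l : List (List (String × String))) : Int :=
  l.foldl (fun b e => max b (rankOf (getStrength e))) 1

theorem rankOf_bounds (s : String) : 1 ≤ rankOf s ∧ rankOf s ≤ 3 := by
  unfold rankOf; split_ifs <;> omega

theorem foldl_rank_shift : ∀ (l : List (List (String × String))) (a : Int), 1 ≤ a →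
    l.foldl (fun b e => max b (rankOf (getStrength e))) a
      = max a (l.foldl (fun b e => max b (rankOf (getStrength e))) 1) := by
  intro l
  induction l with
  | nil => intro a ha; simp; omega
  | cons x xs ih =>
    intro a ha
    have hr := rankOf_bounds (getStrength x)
    simp only [List.foldl_cons]
    rw [ih (max a (rankOf (getStrength x))) (by omega),
        ih (max 1 (rankOf (getStrength x))) (le_max_left _ _)]
    omega

theorem bestRank_cons (x : List (String × String)) (xs : List (List (String × String))) :
    bestRank (x :: xs) = max (rankOf (getStrength x)) (bestRank xs) := by
  have hr := rankOf_bounds (getStrength x)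
  simp only [bestRank, List.foldl_cons]
  rw [foldl_rank_shift xs _ (le_max_left _ _)]
  omega

theorem bestRank_props (l : List (List (String × String))) :
    (1 ≤ bestRank l ∧ bestRank l ≤ 3) ∧
    (bestRank l = 3 ↔ "HIGH" ∈ l.map getStrength) ∧
    (2 ≤ bestRank l ↔ ("HIGH" ∈ l.map getStrength ∨ "MEDIUM" ∈ l.map getStrength)) := by
  induction l with
  | nil => simp [bestRank]
  | cons x xs ih =>
    obtain ⟨⟨h1, h3⟩, hH, hM⟩ := ih
    rw [bestRank_cons]
    have hr := rankOf_bounds (getStrength x)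
    have hr3 : rankOf (getStrength x) = 3 ↔ "HIGH" = getStrength x := by
      unfold rankOf; split_ifs with a b
      · simp [a]
      · exact ⟨fun h => by omega, fun h => absurd h.symm a⟩
      · exact ⟨fun h => by omega, fun h => absurd h.symm a⟩
    have hr2 : 2 ≤ rankOf (getStrength x) ↔ ("HIGH" = getStrength x ∨ "MEDIUM" = getStrength x) := by
      unfold rankOf; split_ifs with a b
      · simp [a]
      · exact ⟨fun _ => Or.inr b.symm, fun _ => by omega⟩
      · exact ⟨fun h => by omega, fun h => by
          rcases h with h | h
          · exact absurd h.symm a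
          · exact absurd h.symm b⟩
    simp only [List.map_cons, List.mem_cons]
    refine ⟨by omega, ?_, ?_⟩
    · rw [show (max (rankOf (getStrength x)) (bestRank xs) = 3) ↔
            (rankOf (getStrength x) = 3 ∨ bestRank xs = 3) from by omega, hr3, hH]
    · rw [show (2 ≤ max (rankOf (getStrength x)) (bestRank xs)) ↔
            (2 ≤ rankOf (getStrength x) ∨ 2 ≤ bestRank xs) from by omega, hr2, hM]
      tauto

-- ===== VERDICT (by name: the statement is the Claim_ definition above) =====
theorem summarize_strength_py_spec : Claim_equal_summarize_strength_py := by
  intro evidence _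
  unfold Spec_summarize_strength_py summarize_strength_py summarize_strength_py_alt
  by_cases he : evidence = []
  · simp [he]
  · simp only [he, if_false]
    obtain ⟨⟨h1, h3⟩, hH, hM⟩ := bestRank_props evidence
    show (if "HIGH" ∈ evidence.map getStrength then "HIGH"
          else if "MEDIUM" ∈ evidence.map getStrength then "MEDIUM" else "LOW") =
         (if bestRank evidence = 3 then "HIGH"
          else if bestRank evidence = 2 then "MEDIUM" else "LOW")
    by_cases hh : "HIGH" ∈ evidence.map getStrength
    · rw [if_pos hh, if_pos (hH.mpr hh)]
    · rw [if_neg hh]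
      have hne3 : bestRank evidence ≠ 3 := fun h => hh (hH.mp h)
      rw [if_neg hne3]
      by_cases hm : "MEDIUM" ∈ evidence.map getStrength
      · rw [if_pos hm]
        have : 2 ≤ bestRank evidence := hM.mpr (Or.inr hm)
        rw [if_pos (by omega)]
      · rw [if_neg hm]
        have : ¬ 2 ≤ bestRank evidence := fun h => by
          rcases hM.mp h with h' | h' <;> [exact hh h'; exact hm h']
        rw [if_neg (by omega)]
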